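-- pv_equiv track=rewrite | github.com/ducky64/parts-labelmaker | DigiKeyCrawler.py | simplify_value
-- ===== SOURCE A (Python) =====
-- def simplify_value(value, preferred=[]):
--   split = value.split(',')
--   first = None
--   for elt in split:
--     if elt.find('(') != -1:
--       elt = elt[:elt.find('(')]
--     if elt.find('@') != -1:
--       elt = elt[:elt.find('@')]
--     elt = elt.strip()
--     if first is None:
--       first = elt
--     if elt in preferred:
--       return elt
--   return first
-- ===== SOURCE B (Python) =====
-- def simplify_value(value, preferred=[]):
--     # single character-level scan: no split(), no find/slice per field;
--     # a cut flag stops accumulating once '(' or '@' is seen inside a field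
--     first = None
--     buf = ''
--     cut = False
--     for ch in value + ',':
--         if ch == ',':
--             field = buf.strip()
--             if first is None:
--                 first = field
--             if field in preferred:
--                 return field
--             buf = ''
--             cut = False
--         elif cut:
--             pass
--         elif ch == '(' or ch == '@':
--             cut = True
--         else:
--             buf = buf + ch
--     return first
-- ===== Notes on version B (the rewrite author's own statement) =====
-- stated objective: alternative
-- what changed: Replaces A's split(',') followed by per-field find/slice/strip cleaning with a single character-level scan of the whole string: a cut flag suppresses accumulation after '(' or '@' inside a field and fields are finalized at each comma, so no split list and no per-field substring searches are ever built.
import Mathlib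
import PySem

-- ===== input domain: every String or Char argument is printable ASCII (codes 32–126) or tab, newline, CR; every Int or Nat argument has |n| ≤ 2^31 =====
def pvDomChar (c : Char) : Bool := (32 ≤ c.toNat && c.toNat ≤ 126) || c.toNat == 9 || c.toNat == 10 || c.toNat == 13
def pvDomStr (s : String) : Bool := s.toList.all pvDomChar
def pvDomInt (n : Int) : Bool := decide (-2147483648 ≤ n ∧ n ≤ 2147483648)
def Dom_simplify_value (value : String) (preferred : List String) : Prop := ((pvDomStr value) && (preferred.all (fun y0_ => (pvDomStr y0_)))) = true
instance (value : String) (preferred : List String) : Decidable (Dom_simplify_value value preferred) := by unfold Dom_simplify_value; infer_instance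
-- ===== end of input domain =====

-- B replaces A's split()-then-clean-each-field (find/slice/strip per field) by a single
-- character-level scan of the whole string with a cut flag; objective: alternative.

-- ===== PORT A =====
-- A's for-loop over the split fields; carried state = 'first : Option String', early return on a preferred hit
def simplifyLoopA (preferred : List String) : List String → Option String → Option String
  | [], first => first
  | elt :: rest, first =>
    let elt := if PySem.Str.find elt "(" ≠ -1 then PySem.Str.slice elt none (some (PySem.Str.find elt "(")) else elt
    let elt := if PySem.Str.find elt "@" ≠ -1 then PySem.Str.slice elt none (some (PySem.Str.find elt "@")) else elt
    let elt := PySem.Str.strip elt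
    let first := if first = none then some elt else first
    if preferred.contains elt then some elt else simplifyLoopA preferred rest first

def simplify_value (value : String) (preferred : List String) : Option String :=
  simplifyLoopA preferred ((PySem.Str.split? value ",").getD []) none

-- ===== PORT B =====
-- Source B's for-loop over the characters of value + ',' ; carried state = (first, buf, cut),
-- buf is the Python str accumulator kept as its list of characters
def simplifyLoopB (preferred : List String) : List Char → Option String → List Char → Bool → Option String
  | [], first, _, _ => first
  | ch :: rest, first, buf, cut =>
    if ch = ',' then
      let field := PySem.Str.strip (String.ofList buf)
      let first := if first = none then some field else first
      if preferred.contains field then some field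
      else simplifyLoopB preferred rest first [] false
    else if cut then simplifyLoopB preferred rest first buf cut
    else if ch = '(' ∨ ch = '@' then simplifyLoopB preferred rest first buf true
    else simplifyLoopB preferred rest first (buf ++ [ch]) cut

def simplify_value_alt (value : String) (preferred : List String) : Option String :=
  simplifyLoopB preferred (value ++ ",").toList none [] false

-- ===== PRECONDITION & SPEC =====
def Spec_simplify_value (value : String) (preferred : List String) (out : Option String) : Prop := out = simplify_value_alt value preferred
instance (value : String) (preferred : List String) (out : Option String) : Decidable (Spec_simplify_value value preferred out) := by unfold Spec_simplify_value; infer_instance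

-- ===== CLAIM (what is proved, stated in full; the proofs are below) =====
def Claim_equal_simplify_value : Prop := ∀ (value : String) (preferred : List String), Dom_simplify_value value preferred → Spec_simplify_value value preferred (simplify_value value preferred)

-- ===== LEMMAS AND PROOFS =====

-- the characters B keeps inside a field (everything before a '(' or '@')
def keepChar (c : Char) : Bool := c ≠ '(' && c ≠ '@'

-- proof-side functional model of PySem.Chars.splitOn for the one-character separator ','
def splitC : List Char → List Char → List (List Char)
  | cur, [] => [cur]
  | cur, c :: rest => if c = ',' then cur :: splitC [] rest else splitC (cur ++ [c]) rest

theorem go_comma : ∀ (l : List Char) (fuel : Nat), l.length < fuel →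
    ∀ (cur : List Char) (acc : List (List Char)),
    PySem.Chars.splitOn.go [','] fuel l cur acc = acc.reverse ++ splitC cur.reverse l := by
  intro l
  induction l with
  | nil =>
      intro fuel hf cur acc
      match fuel, hf with
      | fuel+1, _ => simp [PySem.Chars.splitOn.go, splitC]
  | cons c rest ih =>
      intro fuel hf cur acc
      match fuel, hf with
      | fuel+1, hf =>
        by_cases hc : c = ','
        · subst hc
          have hp : [','].isPrefixOf (',' :: rest) = true := by simp [List.isPrefixOf]
          simp only [PySem.Chars.splitOn.go, hp, if_pos]
          simp only [List.length_cons, List.length_nil, List.drop_succ_cons, List.drop_zero, Nat.zero_add]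
          rw [ih fuel (by simpa using hf) [] (cur.reverse :: acc)]
          simp [splitC]
        · have hp : [','].isPrefixOf (c :: rest) = false := by simp [List.isPrefixOf, Ne.symm hc]
          simp only [PySem.Chars.splitOn.go, hp]
          rw [if_neg (by simp)]
          rw [ih fuel (by simpa using hf) (c :: cur) acc]
          simp [splitC, hc]

theorem splitOn_comma (cs : List Char) : PySem.Chars.splitOn cs [','] = splitC [] cs := by
  rw [PySem.Chars.splitOn, go_comma cs (cs.length+1) (by omega) [] []]
  simp

theorem takeWhile_eq_take_of (p : Char → Bool) (l : List Char) (k : Nat) (hk : k < l.length)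
    (h1 : ∀ i, (h : i < k) → p (l[i]'(by omega)) = true) (h2 : p (l[k]) = false) :
    l.takeWhile p = l.take k := by
  induction l generalizing k with
  | nil => simp at hk
  | cons a l ih =>
    cases k with
    | zero => simp at h2; simp [h2]
    | succ k =>
      have ha : p a = true := h1 0 (by omega)
      simp only [List.takeWhile_cons, ha, if_pos, List.take_succ_cons]
      rw [ih k (by simpa using hk) (fun i h => h1 (i+1) (by omega)) (by simpa using h2)]

theorem singleton_prefix_iff' (cs : List Char) (c : Char) : [c] <+: cs ↔ cs.head? = some c := by
  cases cs <;> simp [List.cons_prefix_cons, eq_comm]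

-- A's per-field truncation at the first occurrence of c IS takeWhile (· ≠ c)
theorem cut_step (cs : List Char) (c : Char) :
    (if PySem.Chars.find cs [c] ≠ -1 then PySem.List.slice cs none (some (PySem.Chars.find cs [c])) else cs)
      = cs.takeWhile (fun a => a ≠ c) := by
  by_cases hmem : c ∈ cs
  · have hne : PySem.Chars.find cs [c] ≠ -1 := by
      rw [PySem.Chars.find_ne_neg_one_iff, List.singleton_infix_iff]; exact hmem
    have hpos : 0 ≤ PySem.Chars.find cs [c] := by
      rw [PySem.Chars.find_nonneg_iff, List.singleton_infix_iff]; exact hmem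
    rw [if_pos hne, PySem.List.slice_to cs hpos]
    obtain ⟨hpre, hmin⟩ := PySem.Chars.find_spec hpos
    set k := (PySem.Chars.find cs [c]).toNat with hkdef
    have hklen : k < cs.length := by
      by_contra h
      rw [List.drop_eq_nil_of_le (by omega)] at hpre
      simp at hpre
    have hgk : cs[k] = c := by
      rw [singleton_prefix_iff'] at hpre
      rw [List.head?_drop] at hpre
      simpa [List.getElem?_eq_getElem hklen] using hpre
    refine (takeWhile_eq_take_of _ cs k hklen ?_ ?_).symm ▸ rfl
    · intro i hi
      have := hmin i hi
      rw [singleton_prefix_iff', List.head?_drop] at this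
      simp only [List.getElem?_eq_getElem (by omega : i < cs.length)] at this
      simp only [decide_eq_true_eq]
      intro h; exact this (by rw [h])
    · simp [hgk]
  · have heq : PySem.Chars.find cs [c] = -1 := by
      rw [PySem.Chars.find_eq_neg_one_iff, List.singleton_infix_iff]; exact hmem
    rw [heq]
    simp only [ne_eq, not_true_eq_false, if_false]
    rw [eq_comm, List.takeWhile_eq_self_iff]
    intro a ha; simp only [decide_eq_true_eq]; rintro rfl; exact hmem ha

theorem str_eq_of_toList {a b : String} (h : a.toList = b.toList) : a = b := by
  have := congrArg String.ofList h
  simpa [String.ofList_toList] using this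

-- A's whole cleaning chain (cut at '(', then '@', then strip) on one field
theorem cleanA_eq (s : String) :
    (PySem.Str.strip
      (let e1 := if PySem.Str.find s "(" ≠ -1 then PySem.Str.slice s none (some (PySem.Str.find s "(")) else s
       if PySem.Str.find e1 "@" ≠ -1 then PySem.Str.slice e1 none (some (PySem.Str.find e1 "@")) else e1))
    = String.ofList (PySem.Chars.strip (s.toList.takeWhile keepChar)) := by
  apply str_eq_of_toList
  have h1 : (if PySem.Str.find s "(" ≠ -1 then PySem.Str.slice s none (some (PySem.Str.find s "(")) else s).toList
      = s.toList.takeWhile (fun a => a ≠ '(') := by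
    rw [apply_ite String.toList]
    simpa using cut_step s.toList '('
  set e1 := if PySem.Str.find s "(" ≠ -1 then PySem.Str.slice s none (some (PySem.Str.find s "(")) else s with he1
  have h2 : (if PySem.Str.find e1 "@" ≠ -1 then PySem.Str.slice e1 none (some (PySem.Str.find e1 "@")) else e1).toList
      = e1.toList.takeWhile (fun a => a ≠ '@') := by
    rw [apply_ite String.toList]
    simpa using cut_step e1.toList '@'
  simp only [PySem.Str.toList_strip, h2, h1, List.takeWhile_takeWhile]
  rw [String.toList_ofList]
  have : (fun a => decide (decide (a ≠ '@') = true ∧ decide (a ≠ '(') = true)) = keepChar := by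
    funext a
    by_cases ha : a = '(' <;> by_cases hb : a = '@' <;> simp [keepChar, ha, hb]
  rw [this]

-- the strip of B's buffer equals the strip in cleanA_eq's right-hand side
theorem strip_ofList (l : List Char) :
    PySem.Str.strip (String.ofList l) = String.ofList (PySem.Chars.strip l) := by
  apply str_eq_of_toList
  simp [PySem.Str.toList_strip, String.toList_ofList]

-- the crux: B's single scan of cs ++ [','] computes A's loop over the fields of cs,
-- invariant: buf = cur.takeWhile keepChar, cut = !cur.all keepChar for the partial field cur
theorem takeWhile_all (cur : List Char) (h : cur.all keepChar = true) :
    cur.takeWhile keepChar = cur :=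
  List.takeWhile_eq_self_iff.mpr (by simpa [List.all_eq_true] using h)

theorem takeWhile_snoc_of_all (cur : List Char) (c : Char) (h : cur.all keepChar = true) :
    (cur ++ [c]).takeWhile keepChar = cur ++ [c].takeWhile keepChar := by
  rw [List.takeWhile_append, takeWhile_all cur h, if_pos rfl]

theorem takeWhile_snoc_of_not_all (cur : List Char) (c : Char) (h : cur.all keepChar = false) :
    (cur ++ [c]).takeWhile keepChar = cur.takeWhile keepChar := by
  rw [List.takeWhile_append]
  rw [if_neg]
  intro hlen
  have : cur.takeWhile keepChar = cur := (List.takeWhile_prefix _).eq_of_length hlen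
  have := List.takeWhile_eq_self_iff.mp this
  simp only [List.all_eq_false] at h
  obtain ⟨a, ha, hk⟩ := h
  exact hk (this a ha)

theorem scan_eq (preferred : List String) :
    ∀ (cs : List Char) (first : Option String) (cur : List Char),
    simplifyLoopB preferred (cs ++ [',']) first (cur.takeWhile keepChar) (!cur.all keepChar)
      = simplifyLoopA preferred ((splitC cur cs).map String.ofList) first := by
  intro cs
  induction cs with
  | nil =>
      intro first cur
      simp only [List.nil_append, simplifyLoopB, if_pos, splitC, List.map_cons, List.map_nil,
        simplifyLoopA, cleanA_eq, strip_ofList, String.toList_ofList]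
  | cons c rest ih =>
      intro first cur
      by_cases hc : c = ','
      · subst hc
        simp only [List.cons_append, simplifyLoopB, if_pos, splitC, List.map_cons,
          simplifyLoopA, cleanA_eq, strip_ofList, String.toList_ofList]
        by_cases hct : preferred.contains (String.ofList (PySem.Chars.strip (cur.takeWhile keepChar))) = true
        · have h : String.ofList (PySem.Chars.strip (cur.takeWhile keepChar)) ∈ preferred := by
            simpa using hct
          simp [h]
        · simp only [Bool.not_eq_true] at hct
          simp only [hct, Bool.false_eq_true, if_false]
          simpa using ih (if first = none then some (String.ofList (PySem.Chars.strip (cur.takeWhile keepChar))) else first) []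
      · simp only [List.cons_append, simplifyLoopB, splitC, if_neg hc]
        by_cases hall : cur.all keepChar
        · simp only [hall, Bool.not_true, Bool.false_eq_true, if_false]
          by_cases hk : keepChar c
          · have hne : ¬ (c = '(' ∨ c = '@') := by
              simp only [keepChar, Bool.and_eq_true, decide_eq_true_eq] at hk
              simp [hk.1, hk.2]
            rw [if_neg hne]
            have e1 : cur.takeWhile keepChar ++ [c] = (cur ++ [c]).takeWhile keepChar := by
              rw [takeWhile_snoc_of_all cur c hall]
              simp [takeWhile_all cur hall, hk]
            have e2 : (cur ++ [c]).all keepChar = true := by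
              simp [List.all_append, hall, hk]
            rw [e1]
            have := ih first (cur ++ [c])
            rw [e2] at this
            simpa using this
          · have hor : c = '(' ∨ c = '@' := by
              simp only [keepChar, Bool.and_eq_true, decide_eq_true_eq] at hk
              by_cases h1 : c = '(' ; · exact Or.inl h1
              exact Or.inr (by tauto)
            rw [if_pos hor]
            have hkf : keepChar c = false := by simpa using hk
            have e1 : cur.takeWhile keepChar = (cur ++ [c]).takeWhile keepChar := by
              rw [takeWhile_snoc_of_all cur c hall]
              simp [takeWhile_all cur hall, hkf]
            have e2 : (cur ++ [c]).all keepChar = false := by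
              simp [List.all_append, hkf]
            rw [e1]
            have := ih first (cur ++ [c])
            rw [e2] at this
            simpa using this
        · have hallf : cur.all keepChar = false := by simpa using hall
          simp only [hallf, Bool.not_false, if_pos]
          have e1 : cur.takeWhile keepChar = (cur ++ [c]).takeWhile keepChar :=
            (takeWhile_snoc_of_not_all cur c hallf).symm
          have e2 : (cur ++ [c]).all keepChar = false := by
            simp [List.all_append, hallf]
          rw [e1]
          have := ih first (cur ++ [c])
          rw [e2] at this
          simpa using this

-- ===== VERDICT (by name: the statement is the Claim_ definition above) =====
theorem simplify_value_spec : Claim_equal_simplify_value := by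
  intro value preferred _
  unfold Spec_simplify_value simplify_value simplify_value_alt
  have hsplit : (PySem.Str.split? value ",").getD []
      = ((splitC [] value.toList).map String.ofList) := by
    rw [PySem.Str.split?]
    have : PySem.Chars.split? value.toList ",".toList
        = some (PySem.Chars.splitOn value.toList [',']) := by
      simp [PySem.Chars.split?]
    rw [this]
    simp [splitOn_comma]
  have htl : (value ++ ",").toList = value.toList ++ [','] := by
    simp
  rw [hsplit, htl]
  have := scan_eq preferred value.toList none []
  simpa using this.symm
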